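-- pv_equiv track=rewrite | github.com/syaofox/novel-creator | app/utils/json_helper.py | _repair_unpaired_quotes
-- ===== SOURCE A (Python) =====
-- def _repair_unpaired_quotes(text: str) -> str:
--     """修复 JSON 字符串内部未配对的引号"""
--     result = ""
--     in_string = False
--     string_char = ""
--     i = 0
--
--     while i < len(text):
--         char = text[i]
--         next_char = text[i + 1] if i + 1 < len(text) else ""
--
--         if not in_string:
--             if char in ('"', "'"):
--                 in_string = True
--                 string_char = char
--                 result += char
--             else:
--                 result += char
--         else:
--             if char == "\\" and next_char in ('"', "'"):
--                 result += char + next_char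
--                 i += 2
--                 continue
--             if char == string_char:
--                 rest = text[i + 1 :].strip()
--                 if (
--                     rest == ""
--                     or rest.startswith(",")
--                     or rest.startswith("}")
--                     or rest.startswith("]")
--                     or rest.startswith(":")
--                 ):
--                     in_string = False
--                     result += char
--                 else:
--                     result += "\\" + char
--             else:
--                 result += char
--         i += 1
--     return result
-- ===== SOURCE B (Python) =====
-- def _repair_unpaired_quotes(text: str) -> str:
--     """修复 JSON 字符串内部未配对的引号 (O(n): precomputed next-non-whitespace lookup)"""
--     n = len(text)
--     # nxt[i] = first non-whitespace character strictly after index i, or None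
--     nxt = [None] * n
--     cur = None
--     for i in range(n - 1, -1, -1):
--         nxt[i] = cur
--         if not text[i].isspace():
--             cur = text[i]
--     out = []
--     in_string = False
--     string_char = ""
--     i = 0
--     while i < n:
--         char = text[i]
--         if not in_string:
--             if char in ('"', "'"):
--                 in_string = True
--                 string_char = char
--             out.append(char)
--         else:
--             if char == "\\" and i + 1 < n and text[i + 1] in ('"', "'"):
--                 out.append(char)
--                 out.append(text[i + 1])
--                 i += 2
--                 continue
--             if char == string_char:
--                 nc = nxt[i]
--                 if nc is None or nc in ",}]:":
--                     in_string = False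
--                     out.append(char)
--                 else:
--                     out.append("\\")
--                     out.append(char)
--             else:
--                 out.append(char)
--         i += 1
--     return "".join(out)
-- ===== Notes on version B (the rewrite author's own statement) =====
-- stated objective: faster
-- what changed: A re-slices and strips the whole remaining suffix at every candidate closing quote; B precomputes the next non-whitespace character for every index in one reverse pass, so each closing-quote test is O(1).
import Mathlib
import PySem

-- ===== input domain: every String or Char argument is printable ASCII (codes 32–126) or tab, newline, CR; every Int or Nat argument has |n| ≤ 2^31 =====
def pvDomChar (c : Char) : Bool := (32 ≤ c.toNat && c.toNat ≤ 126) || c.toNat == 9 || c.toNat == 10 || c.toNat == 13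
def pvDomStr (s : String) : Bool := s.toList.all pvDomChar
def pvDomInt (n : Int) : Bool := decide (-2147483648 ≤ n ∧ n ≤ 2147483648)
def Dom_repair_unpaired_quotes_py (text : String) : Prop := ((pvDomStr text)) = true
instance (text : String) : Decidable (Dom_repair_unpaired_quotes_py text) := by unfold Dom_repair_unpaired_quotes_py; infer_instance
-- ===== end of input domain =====

-- B replaces A's per-closing-quote `text[i+1:].strip()` (O(n) each) with a single reverse
-- pass that precomputes the next non-whitespace character after every index (objective: faster).

-- ===== PORT A =====
-- A's while-loop, step for step: each iteration consumes one char (two on the escape branch,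
-- `t.take 1 ++ … t.tail` = `result += char + next_char; i += 2`); the closing-quote test
-- strips the whole remaining suffix `text[i+1:]` and checks its first character.
def pvLoopA (l : List Char) (inStr : Bool) (sc : Char) : List Char :=
  match l with
  | [] => []
  | c :: t =>
    if !inStr then
      if c = '"' ∨ c = '\'' then c :: pvLoopA t true c
      else c :: pvLoopA t inStr sc
    else
      if c = '\\' ∧ (t.head? = some '"' ∨ t.head? = some '\'') then
        c :: (t.take 1 ++ pvLoopA t.tail inStr sc)
      else if c = sc then
        (if PySem.Chars.strip t = [] ∨
            PySem.Chars.startswith (PySem.Chars.strip t) [','] = true ∨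
            PySem.Chars.startswith (PySem.Chars.strip t) ['}'] = true ∨
            PySem.Chars.startswith (PySem.Chars.strip t) [']'] = true ∨
            PySem.Chars.startswith (PySem.Chars.strip t) [':'] = true then
          c :: pvLoopA t false sc
        else
          '\\' :: c :: pvLoopA t inStr sc)
      else c :: pvLoopA t inStr sc
  termination_by l.length
  decreasing_by all_goals (simp_all [List.length_tail]; try omega)

def repair_unpaired_quotes_py (text : String) : String :=
  String.ofList (pvLoopA text.toList false ' ')

-- ===== PORT B =====
-- B's reverse pass: nxt[i] = first non-whitespace char strictly after index i (none if absent).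
def pvBuildNxt (l : List Char) : List (Option Char) :=
  (l.foldr (fun c (p : Option Char × List (Option Char)) =>
      (if PySem.Chars.isspace c then p.1 else some c, p.1 :: p.2))
    ((none : Option Char), [])).2

-- B's forward pass over the characters zipped with their precomputed lookup:
-- the closing-quote test reads the precomputed char instead of stripping the suffix.
def pvLoopB (l : List (Char × Option Char)) (inStr : Bool) (sc : Char) : List Char :=
  match l with
  | [] => []
  | (c, nx) :: t =>
    if !inStr then
      if c = '"' ∨ c = '\'' then c :: pvLoopB t true c
      else c :: pvLoopB t inStr sc
    else
      if c = '\\' ∧ (t.head?.map Prod.fst = some '"' ∨ t.head?.map Prod.fst = some '\'') then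
        c :: ((t.take 1).map Prod.fst ++ pvLoopB t.tail inStr sc)
      else if c = sc then
        (if nx = none ∨ nx = some ',' ∨ nx = some '}' ∨ nx = some ']' ∨ nx = some ':' then
          c :: pvLoopB t false sc
        else
          '\\' :: c :: pvLoopB t inStr sc)
      else c :: pvLoopB t inStr sc
  termination_by l.length
  decreasing_by all_goals (simp_all [List.length_tail]; try omega)

def repair_unpaired_quotes_py_alt (text : String) : String :=
  String.ofList (pvLoopB (text.toList.zip (pvBuildNxt text.toList)) false ' ')

-- ===== PRECONDITION & SPEC =====
def Spec_repair_unpaired_quotes_py (text : String) (out : String) : Prop := out = repair_unpaired_quotes_py_alt text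
instance (text : String) (out : String) : Decidable (Spec_repair_unpaired_quotes_py text out) := by unfold Spec_repair_unpaired_quotes_py; infer_instance

-- ===== CLAIM (what is proved, stated in full; the proofs are below) =====
def Claim_equal_repair_unpaired_quotes_py : Prop := ∀ (text : String), Dom_repair_unpaired_quotes_py text → Spec_repair_unpaired_quotes_py text (repair_unpaired_quotes_py text)

-- ===== LEMMAS AND PROOFS =====

-- first non-whitespace character of a suffix
def pvFnw (l : List Char) : Option Char := l.find? (fun c => !PySem.Chars.isspace c)

lemma pvFold_fst (l : List Char) :
    (l.foldr (fun c (p : Option Char × List (Option Char)) =>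
        (if PySem.Chars.isspace c then p.1 else some c, p.1 :: p.2))
      ((none : Option Char), [])).1 = pvFnw l := by
  induction l with
  | nil => simp [pvFnw]
  | cons c t ih =>
    simp only [List.foldr, pvFnw, List.find?]
    by_cases h : PySem.Chars.isspace c = true <;> simp [h, ih, pvFnw]

lemma pvBuildNxt_cons (c : Char) (t : List Char) :
    pvBuildNxt (c :: t) = pvFnw t :: pvBuildNxt t := by
  simp [pvBuildNxt, List.foldr, pvFold_fst]

-- the stripped-suffix test of A equals the next-non-whitespace test of B
lemma pvCond_eq (t : List Char) :
    (PySem.Chars.strip t = [] ∨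
     PySem.Chars.startswith (PySem.Chars.strip t) [','] = true ∨
     PySem.Chars.startswith (PySem.Chars.strip t) ['}'] = true ∨
     PySem.Chars.startswith (PySem.Chars.strip t) [']'] = true ∨
     PySem.Chars.startswith (PySem.Chars.strip t) [':'] = true) ↔
    (pvFnw t = none ∨ pvFnw t = some ',' ∨ pvFnw t = some '}' ∨
     pvFnw t = some ']' ∨ pvFnw t = some ':') := by
  induction t with
  | nil => simp [PySem.Chars.strip, PySem.Chars.lstrip, PySem.Chars.rstrip, pvFnw]
  | cons c t ih =>
    by_cases h : PySem.Chars.isspace c = true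
    · have hl : PySem.Chars.strip (c :: t) = PySem.Chars.strip t := by
        simp [PySem.Chars.strip, PySem.Chars.lstrip, List.dropWhile, h]
      have hf : pvFnw (c :: t) = pvFnw t := by
        simp [pvFnw, List.find?, h]
      rw [hl, hf]; exact ih
    · -- c is not whitespace: lstrip keeps c, rstrip keeps the (non-ws) head
      have hl : PySem.Chars.lstrip (c :: t) = c :: t := by
        simp [PySem.Chars.lstrip, List.dropWhile, h]
      have hf : pvFnw (c :: t) = some c := by
        simp [pvFnw, List.find?, h]
      have hdrop : ∀ (l : List Char), List.dropWhile PySem.Chars.isspace (l ++ [c])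
          = List.dropWhile PySem.Chars.isspace l ++ [c] := by
        intro l
        induction l with
        | nil => simp [List.dropWhile, h]
        | cons a l ihl =>
          by_cases ha : PySem.Chars.isspace a = true <;>
            simp [List.dropWhile, ha, ihl]
      -- strip (c :: t) is nonempty with head c
      have hne : ∃ r, PySem.Chars.strip (c :: t) = c :: r := by
        refine ⟨(List.dropWhile PySem.Chars.isspace t.reverse).reverse, ?_⟩
        unfold PySem.Chars.strip
        rw [hl]
        unfold PySem.Chars.rstrip
        have hrev : (c :: t).reverse = t.reverse ++ [c] := by simp
        rw [hrev, hdrop]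
        simp
      rcases hne with ⟨r, hr⟩
      rw [hf, hr]
      have hsw : ∀ x : Char, (PySem.Chars.startswith (c :: r) [x] = true) = (x = c) := by
        intro x
        simp [PySem.Chars.startswith, List.isPrefixOf]
      simp only [hsw]
      constructor
      · rintro (hh | rfl | rfl | rfl | rfl)
        · exact absurd hh (by simp)
        · simp
        · simp
        · simp
        · simp
      · rintro (hh | hh | hh | hh | hh) <;> simp_all
    -- main loop correspondence
lemma pvLoop_eq_aux : ∀ (n : Nat) (l : List Char), l.length ≤ n →
    ∀ (inStr : Bool) (sc : Char),
    pvLoopA l inStr sc = pvLoopB (l.zip (pvBuildNxt l)) inStr sc := by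
  intro n
  induction n with
  | zero =>
    intro l hl inStr sc
    have : l = [] := List.eq_nil_of_length_eq_zero (Nat.le_zero.mp hl)
    subst this
    simp [pvLoopA, pvLoopB, pvBuildNxt]
  | succ n ih =>
    intro l hl inStr sc
    cases l with
    | nil => simp [pvLoopA, pvLoopB, pvBuildNxt]
    | cons c t =>
      rw [pvBuildNxt_cons]
      simp only [List.zip_cons_cons]
      have hlen : t.length ≤ n := by simp at hl; omega
      rw [pvLoopA, pvLoopB]
      by_cases hin : inStr = true
      · subst hin
        simp only [Bool.not_true, Bool.false_eq_true, if_false]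
        have hheads : (t.zip (pvBuildNxt t)).head?.map Prod.fst = t.head? := by
          cases t with
          | nil => simp [pvBuildNxt]
          | cons d t' => rw [pvBuildNxt_cons]; simp
        by_cases hesc : c = '\\' ∧ (t.head? = some '"' ∨ t.head? = some '\'')
        · have hescB : c = '\\' ∧ ((t.zip (pvBuildNxt t)).head?.map Prod.fst = some '"' ∨
              (t.zip (pvBuildNxt t)).head?.map Prod.fst = some '\'') := by
            rw [hheads]; exact hesc
          rw [if_pos hesc, if_pos hescB]
          cases t with
          | nil => rcases hesc with ⟨_, hh | hh⟩ <;> simp at hh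
          | cons d t' =>
            rw [pvBuildNxt_cons]
            simp only [List.zip_cons_cons, List.take, List.tail]
            have ht' : t'.length ≤ n := by simp at hl; omega
            rw [ih t' ht' true sc]
            simp
        · have hescB : ¬ (c = '\\' ∧ ((t.zip (pvBuildNxt t)).head?.map Prod.fst = some '"' ∨
              (t.zip (pvBuildNxt t)).head?.map Prod.fst = some '\'')) := by
            rw [hheads]; exact hesc
          rw [if_neg hesc, if_neg hescB]
          by_cases hc : c = sc
          · rw [if_pos hc, if_pos hc]
            by_cases hcond : (PySem.Chars.strip t = [] ∨
                PySem.Chars.startswith (PySem.Chars.strip t) [','] = true ∨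
                PySem.Chars.startswith (PySem.Chars.strip t) ['}'] = true ∨
                PySem.Chars.startswith (PySem.Chars.strip t) [']'] = true ∨
                PySem.Chars.startswith (PySem.Chars.strip t) [':'] = true)
            · rw [if_pos hcond, if_pos ((pvCond_eq t).mp hcond), ih t hlen false sc]
            · rw [if_neg hcond, if_neg (fun hb => hcond ((pvCond_eq t).mpr hb)),
                ih t hlen true sc]
          · rw [if_neg hc, if_neg hc, ih t hlen true sc]
      · have hin' : inStr = false := by cases inStr <;> simp_all
        subst hin'
        simp only [Bool.not_false, if_true]
        by_cases hq : c = '"' ∨ c = '\''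
        · rw [if_pos hq, if_pos hq, ih t hlen true c]
        · rw [if_neg hq, if_neg hq, ih t hlen false sc]

-- ===== VERDICT (by name: the statement is the Claim_ definition above) =====
theorem repair_unpaired_quotes_py_spec : Claim_equal_repair_unpaired_quotes_py := by
  intro text _
  unfold Spec_repair_unpaired_quotes_py repair_unpaired_quotes_py repair_unpaired_quotes_py_alt
  rw [pvLoop_eq_aux text.toList.length text.toList le_rfl]
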